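-- pv_equiv track=rewrite | github.com/lostmyway02/CSE_318 | heuristics.py | heuristic_8
-- ===== SOURCE A (Python) =====
-- def heuristic_8(board, ai_player):
--     rows = len(board)
--     cols = len(board[0])
--     score = 0
--     edge_cells = []
--     corner_positions = [(0, 0), (0, cols - 1), (rows - 1, 0), (rows - 1, cols - 1)]
--
--
--     # Edge consists of top, bottom, left, right cloumns excluding corners
--     # Top & Bottom
--     for j in range(1, cols - 1):
--         edge_cells.append((0,j))
--         edge_cells.append((rows - 1, j))
--
--     # Left & Right
--     for i in range(1, rows-1):
--         edge_cells.append((i,0))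
--         edge_cells.append((i, cols -1))
--
--     for i in range(rows):
--         for j in range(cols):
--             count, owner = board[i][j]
--             if owner == ai_player:
--                 score += count  # base score for owning orbs
--
--                 if (i, j) in edge_cells:
--                     score += 1
--                 elif (i,j) in corner_positions:
--                     score += 2
--
--             elif owner and owner != ai_player:
--                 score -= count
--
--                 if (i, j) in edge_cells:
--                     score -= 1
--                 elif (i,j) in corner_positions:
--                     score -= 2
--
--
--     return score
-- ===== SOURCE B (Python) =====
-- def heuristic_8(board, ai_player):
--     rows = len(board)
--     cols = len(board[0])
--     if cols == 0:
--         return 0  # rows carry no cells at all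
--
--     def sign(owner):
--         if owner == ai_player:
--             return 1
--         return -1 if owner else 0
--
--     # Pass 1: base score over every cell, no boundary logic.
--     base = sum(sign(owner) * count
--                for row in board
--                for count, owner in row[:cols])
--
--     # Pass 2: bonuses only on the (deduplicated) boundary positions.
--     corners = {(0, 0), (0, cols - 1), (rows - 1, 0), (rows - 1, cols - 1)}
--     edges = ({(0, j) for j in range(1, cols - 1)}
--              | {(rows - 1, j) for j in range(1, cols - 1)}
--              | {(i, 0) for i in range(1, rows - 1)}
--              | {(i, cols - 1) for i in range(1, rows - 1)})
--
--     bonus = sum(sign(board[i][j][1]) for i, j in edges) \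
--         + 2 * sum(sign(board[i][j][1]) for i, j in corners)
--     return base + bonus
-- ===== Notes on version B (the rewrite author's own statement) =====
-- stated objective: faster
-- what changed: B is staged instead of A's single annotated sweep: pass 1 sums the signed base score over all cells with no boundary logic, then pass 2 builds deduplicated corner and edge position SETS and adds the +-2/+-1 bonuses by iterating only those boundary positions, removing A's per-cell linear membership scan of the edge list.
import Mathlib
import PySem

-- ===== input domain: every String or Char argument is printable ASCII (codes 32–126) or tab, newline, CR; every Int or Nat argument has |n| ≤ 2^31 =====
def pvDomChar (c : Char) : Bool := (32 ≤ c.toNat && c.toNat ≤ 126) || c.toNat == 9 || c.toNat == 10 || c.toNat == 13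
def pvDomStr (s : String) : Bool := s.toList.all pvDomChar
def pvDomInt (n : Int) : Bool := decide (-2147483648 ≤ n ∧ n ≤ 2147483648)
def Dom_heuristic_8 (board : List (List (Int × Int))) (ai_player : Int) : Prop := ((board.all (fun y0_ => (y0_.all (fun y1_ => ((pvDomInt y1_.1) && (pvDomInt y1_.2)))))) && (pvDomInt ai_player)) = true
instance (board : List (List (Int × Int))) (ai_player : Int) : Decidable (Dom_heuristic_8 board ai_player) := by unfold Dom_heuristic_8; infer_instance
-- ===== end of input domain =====

-- B replaces A's single sweep (which membership-tests every cell against a precomputed edge list)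
-- by two stages: one plain base-score pass over all cells, then bonuses added by iterating only the
-- deduplicated corner/edge position sets; this removes the per-cell linear scan: faster.

-- ===== PORT A =====
def heuristic_8 (board : List (List (Int × Int))) (ai_player : Int) : Int :=
  let rows : Int := board.length
  let cols : Int := (((PySem.List.pyGet? board 0).getD []).length : Int)
  let corner_positions : List (Int × Int) :=
    [(0, 0), (0, cols - 1), (rows - 1, 0), (rows - 1, cols - 1)]
  let edge_cells : List (Int × Int) :=
    (PySem.List.pyRange 1 (cols - 1) 1).foldl (fun acc j => acc ++ [(0, j), (rows - 1, j)]) []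
  let edge_cells : List (Int × Int) :=
    (PySem.List.pyRange 1 (rows - 1) 1).foldl (fun acc i => acc ++ [(i, 0), (i, cols - 1)]) edge_cells
  (PySem.List.pyRange 0 rows 1).foldl (fun score i =>
    (PySem.List.pyRange 0 cols 1).foldl (fun score j =>
      let cell := PySem.List.pyGetD (PySem.List.pyGetD board i []) j (0, 0)
      let count := cell.1
      let owner := cell.2
      if owner == ai_player then
        let score := score + count
        if (i, j) ∈ edge_cells then score + 1
        else if (i, j) ∈ corner_positions then score + 2
        else score
      else if owner != 0 && owner != ai_player then
        let score := score - count
        if (i, j) ∈ edge_cells then score - 1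
        else if (i, j) ∈ corner_positions then score - 2
        else score
      else score) score) 0

-- ===== PORT B =====
def pvSign (ai_player owner : Int) : Int :=
  if owner == ai_player then 1 else if owner != 0 then -1 else 0

def heuristic_8_alt (board : List (List (Int × Int))) (ai_player : Int) : Int :=
  let rows : Int := board.length
  let cols : Int := (((PySem.List.pyGet? board 0).getD []).length : Int)
  if cols == 0 then 0
  else
    -- Pass 1: base score over every cell.
    let base : Int :=
      ((board.flatMap (fun row => PySem.List.slice row none (some cols))).map
        (fun c => pvSign ai_player c.2 * c.1)).sum
    -- Pass 2: bonuses only on the deduplicated boundary position sets.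
    let corners : PySem.Set (Int × Int) :=
      PySem.Set.ofList [(0, 0), (0, cols - 1), (rows - 1, 0), (rows - 1, cols - 1)]
    let edges : PySem.Set (Int × Int) :=
      PySem.Set.union (PySem.Set.union (PySem.Set.union
        (PySem.Set.ofList ((PySem.List.pyRange 1 (cols - 1) 1).map (fun j => ((0 : Int), j))))
        ((PySem.List.pyRange 1 (cols - 1) 1).map (fun j => (rows - 1, j))))
        ((PySem.List.pyRange 1 (rows - 1) 1).map (fun i => (i, (0 : Int)))))
        ((PySem.List.pyRange 1 (rows - 1) 1).map (fun i => (i, cols - 1)))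
    -- sums over the sets: order-independent, so folding the Set's list is exact
    let bonus : Int :=
      ((edges : List (Int × Int)).map (fun p =>
        pvSign ai_player (PySem.List.pyGetD (PySem.List.pyGetD board p.1 []) p.2 (0, 0)).2)).sum
      + 2 * ((corners : List (Int × Int)).map (fun p =>
        pvSign ai_player (PySem.List.pyGetD (PySem.List.pyGetD board p.1 []) p.2 (0, 0)).2)).sum
    base + bonus

-- ===== PRECONDITION & SPEC =====
-- Pre_ excludes exactly the inputs on which the Python A raises IndexError: the empty board
-- (len(board[0])) and ragged boards whose later rows are shorter than the first row (board[i][j]).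
def Pre_heuristic_8 (board : List (List (Int × Int))) (ai_player : Int) : Prop :=
  board ≠ [] ∧ ∀ row ∈ board, board.headI.length ≤ row.length
instance (board : List (List (Int × Int))) (ai_player : Int) : Decidable (Pre_heuristic_8 board ai_player) := by
  unfold Pre_heuristic_8; infer_instance
def pvWitness_heuristic_8 : (List (List (Int × Int))) × Int := ([[(1, 1), (2, 2)], [(3, 0), (1, 2)]], 1)

def Spec_heuristic_8 (board : List (List (Int × Int))) (ai_player : Int) (out : Int) : Prop := out = heuristic_8_alt board ai_player
instance (board : List (List (Int × Int))) (ai_player : Int) (out : Int) : Decidable (Spec_heuristic_8 board ai_player out) := by unfold Spec_heuristic_8; infer_instance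

-- ===== CLAIM (what is proved, stated in full; the proofs are below) =====
def Claim_equal_heuristic_8 : Prop := ∀ (board : List (List (Int × Int))) (ai_player : Int), Dom_heuristic_8 board ai_player → Pre_heuristic_8 board ai_player → Spec_heuristic_8 board ai_player (heuristic_8 board ai_player)

-- ===== LEMMAS AND PROOFS =====

-- the grid of positions A's double loop visits
def pvGrid (R C : Int) : List (Int × Int) :=
  (PySem.List.pyRange 0 R 1).flatMap (fun i => (PySem.List.pyRange 0 C 1).map (fun j => (i, j)))

theorem mem_pvGrid (R C : Int) (p : Int × Int) :
    p ∈ pvGrid R C ↔ 0 ≤ p.1 ∧ p.1 < R ∧ 0 ≤ p.2 ∧ p.2 < C := by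
  obtain ⟨i, j⟩ := p
  unfold pvGrid
  rw [List.mem_flatMap]
  constructor
  · rintro ⟨a, ha, hmem⟩
    obtain ⟨b, hb, heq⟩ := List.mem_map.1 hmem
    rw [Prod.mk.injEq] at heq
    obtain ⟨rfl, rfl⟩ := heq
    rw [PySem.List.mem_pyRange_one] at ha hb
    exact ⟨ha.1, ha.2, hb.1, hb.2⟩
  · rintro ⟨h1, h2, h3, h4⟩
    exact ⟨i, PySem.List.mem_pyRange_one.2 ⟨h1, h2⟩,
      List.mem_map.2 ⟨j, PySem.List.mem_pyRange_one.2 ⟨h3, h4⟩, rfl⟩⟩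

theorem nodup_pvGrid (R C : Int) : (pvGrid R C).Nodup := by
  unfold pvGrid
  rw [List.nodup_flatMap]
  constructor
  · intro i _
    exact (PySem.List.nodup_pyRange_one 0 C).map (fun a b h => by simpa using congrArg Prod.snd h)
  · refine (PySem.List.nodup_pyRange_one 0 R).pairwise_of_forall_ne ?_
    intro a b _ _ hne
    intro x hxa hxb
    obtain ⟨j, _, rfl⟩ := List.mem_map.1 hxa
    obtain ⟨k, _, hk⟩ := List.mem_map.1 hxb
    rw [Prod.mk.injEq] at hk
    exact hne hk.1.symm

-- a double fold over the two ranges is a sum over the grid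
theorem sum_sum_eq_sum_pvGrid (R C : Int) (g : Int → Int → Int) :
    ((PySem.List.pyRange 0 R 1).map (fun i =>
      ((PySem.List.pyRange 0 C 1).map (fun j => g i j)).sum)).sum
    = ((pvGrid R C).map (fun p => g p.1 p.2)).sum := by
  unfold pvGrid
  rw [List.flatMap_def, List.map_flatten, List.sum_flatten]
  simp [Function.comp_def, List.map_map]

-- an indicator sum over the grid collapses to a sum over the (nodup) position set
theorem sum_map_ite_filter (G S : List (Int × Int)) (g : Int × Int → Int) :
    (G.map (fun p => if p ∈ S then g p else 0)).sum
    = ((G.filter (fun p => decide (p ∈ S))).map g).sum := by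
  induction G with
  | nil => rfl
  | cons x xs ih => by_cases hx : x ∈ S <;> simp [hx, ih]

theorem sum_map_ite_mem (G S : List (Int × Int)) (g : Int × Int → Int)
    (hG : G.Nodup) (hS : S.Nodup) (hsub : ∀ p ∈ S, p ∈ G) :
    (G.map (fun p => if p ∈ S then g p else 0)).sum = (S.map g).sum := by
  rw [sum_map_ite_filter]
  have hperm : (G.filter (fun p => decide (p ∈ S))).Perm S := by
    rw [List.perm_ext_iff_of_nodup (hG.filter _) hS]
    intro p
    simp only [List.mem_filter, decide_eq_true_eq]
    exact ⟨fun h => h.2, fun h => ⟨hsub p h, h⟩⟩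
  exact (hperm.map g).sum_eq

-- membership in A's edge_cells list, arithmetically
theorem mem_edge (rows cols : Int) (i j : Int) :
    ((i, j) ∈ (PySem.List.pyRange 1 (rows - 1) 1).foldl
        (fun acc i => acc ++ [(i, 0), (i, cols - 1)])
        ((PySem.List.pyRange 1 (cols - 1) 1).foldl
          (fun acc j => acc ++ [(0, j), (rows - 1, j)]) ([] : List (Int × Int)))) ↔
      (((i = 0 ∨ i = rows - 1) ∧ 1 ≤ j ∧ j < cols - 1) ∨
        ((j = 0 ∨ j = cols - 1) ∧ 1 ≤ i ∧ i < rows - 1)) := by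
  rw [PySem.List.foldl_append_eq_flatMap, PySem.List.foldl_append_eq_flatMap]
  simp only [List.nil_append, List.mem_append, List.mem_flatMap,
    PySem.List.mem_pyRange_one, List.mem_cons, List.not_mem_nil, or_false,
    Prod.mk.injEq]
  constructor
  · rintro (⟨a, ⟨h1, h2⟩, (⟨rfl, rfl⟩ | ⟨rfl, rfl⟩)⟩ | ⟨a, ⟨h1, h2⟩, (⟨rfl, rfl⟩ | ⟨rfl, rfl⟩)⟩) <;> omega
  · rintro (⟨hr, h1, h2⟩ | ⟨hc, h1, h2⟩)
    · exact Or.inl ⟨j, ⟨h1, h2⟩, by rcases hr with rfl | rfl <;> simp⟩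
    · exact Or.inr ⟨i, ⟨h1, h2⟩, by rcases hc with rfl | rfl <;> simp⟩

-- membership in B's edges set, arithmetically (same condition as A's edge list)
theorem mem_edgeSet (rows cols : Int) (i j : Int) :
    ((i, j) ∈ PySem.Set.union (PySem.Set.union (PySem.Set.union
        (PySem.Set.ofList ((PySem.List.pyRange 1 (cols - 1) 1).map (fun j => ((0 : Int), j))))
        ((PySem.List.pyRange 1 (cols - 1) 1).map (fun j => (rows - 1, j))))
        ((PySem.List.pyRange 1 (rows - 1) 1).map (fun i => (i, (0 : Int)))))
        ((PySem.List.pyRange 1 (rows - 1) 1).map (fun i => (i, cols - 1)))) ↔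
      (((i = 0 ∨ i = rows - 1) ∧ 1 ≤ j ∧ j < cols - 1) ∨
        ((j = 0 ∨ j = cols - 1) ∧ 1 ≤ i ∧ i < rows - 1)) := by
  simp only [PySem.Set.mem_union, PySem.Set.mem_ofList, List.mem_map,
    PySem.List.mem_pyRange_one, Prod.mk.injEq]
  constructor
  · rintro (((⟨a, ⟨h1, h2⟩, rfl, rfl⟩ | ⟨a, ⟨h1, h2⟩, rfl, rfl⟩) | ⟨a, ⟨h1, h2⟩, rfl, rfl⟩) | ⟨a, ⟨h1, h2⟩, rfl, rfl⟩) <;> omega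
  · rintro (⟨hr, h1, h2⟩ | ⟨hc, h1, h2⟩)
    · rcases hr with rfl | rfl
      · exact Or.inl (Or.inl (Or.inl ⟨j, ⟨h1, h2⟩, rfl, rfl⟩))
      · exact Or.inl (Or.inl (Or.inr ⟨j, ⟨h1, h2⟩, rfl, rfl⟩))
    · rcases hc with rfl | rfl
      · exact Or.inl (Or.inr ⟨i, ⟨h1, h2⟩, rfl, rfl⟩)
      · exact Or.inr ⟨i, ⟨h1, h2⟩, rfl, rfl⟩

theorem nodup_edgeSet (rows cols : Int) :
    (PySem.Set.union (PySem.Set.union (PySem.Set.union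
        (PySem.Set.ofList ((PySem.List.pyRange 1 (cols - 1) 1).map (fun j => ((0 : Int), j))))
        ((PySem.List.pyRange 1 (cols - 1) 1).map (fun j => (rows - 1, j))))
        ((PySem.List.pyRange 1 (rows - 1) 1).map (fun i => (i, (0 : Int)))))
        ((PySem.List.pyRange 1 (rows - 1) 1).map (fun i => (i, cols - 1))) : List (Int × Int)).Nodup :=
  PySem.Set.nodup_union _ _ (PySem.Set.nodup_union _ _ (PySem.Set.nodup_union _ _
    (PySem.Set.nodup_ofList _)))

-- the first C entries of a row, read through pyGetD over range(C)
theorem row_take (row : List (Int × Int)) (C : Nat) (hC : C ≤ row.length) :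
    (PySem.List.pyRange 0 (C : Int) 1).map
      (fun j => PySem.List.pyGetD row j ((0 : Int), (0 : Int))) = row.take C := by
  rw [PySem.List.pyRange_zero_natCast, List.map_map]
  apply List.ext_getElem
  · simp [hC]
  · intro k h1 h2
    have hkC : k < C ∧ k < row.length := by simpa using h2
    simp only [List.getElem_map, List.getElem_range, Function.comp_apply,
      PySem.List.pyGetD_natCast, List.getElem_take]
    rw [List.getD_eq_getElem?_getD, List.getElem?_eq_getElem (by omega)]
    rfl

-- ===== MAIN EQUIVALENCE =====
theorem heuristic_8_eq (board : List (List (Int × Int))) (ai_player : Int)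
    (hb : board ≠ []) (hrow : ∀ row ∈ board, board.headI.length ≤ row.length) :
    heuristic_8 board ai_player = heuristic_8_alt board ai_player := by
  obtain ⟨r0, rest, rfl⟩ : ∃ r0 rest, board = r0 :: rest := by
    cases board with
    | nil => exact absurd rfl hb
    | cons a l => exact ⟨a, l, rfl⟩
  have hhead : (PySem.List.pyGet? (r0 :: rest) (0 : Int)).getD [] = r0 := by
    simp [pysem]
  by_cases hC0 : r0.length = 0
  · -- no columns: A's inner loop is empty, B returns 0 up front
    unfold heuristic_8 heuristic_8_alt
    dsimp only
    rw [hhead, hC0]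
    simp
  · -- C ≥ 1
    have hA : heuristic_8 (r0 :: rest) ai_player
        = ((PySem.List.pyRange 0 (((r0 :: rest).length : Nat) : Int) 1).map (fun i =>
            ((PySem.List.pyRange 0 ((r0.length : Nat) : Int) 1).map (fun j =>
              pvSign ai_player (PySem.List.pyGetD (PySem.List.pyGetD (r0 :: rest) i []) j (0, 0)).2 *
                ((PySem.List.pyGetD (PySem.List.pyGetD (r0 :: rest) i []) j (0, 0)).1 +
                  (if (((i = 0 ∨ i = ((r0 :: rest).length : Int) - 1) ∧ 1 ≤ j ∧ j < (r0.length : Int) - 1) ∨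
                        ((j = 0 ∨ j = (r0.length : Int) - 1) ∧ 1 ≤ i ∧ i < ((r0 :: rest).length : Int) - 1)) then 1
                   else if (i, j) ∈ [((0 : Int), (0 : Int)), (0, (r0.length : Int) - 1),
                        (((r0 :: rest).length : Int) - 1, 0), (((r0 :: rest).length : Int) - 1, (r0.length : Int) - 1)] then 2
                   else 0)))).sum)).sum := by
      unfold heuristic_8
      dsimp only
      rw [hhead]
      calc (PySem.List.pyRange 0 (((r0 :: rest).length : Nat) : Int) 1).foldl _ 0
          = (PySem.List.pyRange 0 (((r0 :: rest).length : Nat) : Int) 1).foldl (fun score i =>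
              score + ((PySem.List.pyRange 0 ((r0.length : Nat) : Int) 1).map (fun j =>
                pvSign ai_player (PySem.List.pyGetD (PySem.List.pyGetD (r0 :: rest) i []) j (0, 0)).2 *
                  ((PySem.List.pyGetD (PySem.List.pyGetD (r0 :: rest) i []) j (0, 0)).1 +
                    (if (((i = 0 ∨ i = ((r0 :: rest).length : Int) - 1) ∧ 1 ≤ j ∧ j < (r0.length : Int) - 1) ∨
                          ((j = 0 ∨ j = (r0.length : Int) - 1) ∧ 1 ≤ i ∧ i < ((r0 :: rest).length : Int) - 1)) then 1
                     else if (i, j) ∈ [((0 : Int), (0 : Int)), (0, (r0.length : Int) - 1),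
                          (((r0 :: rest).length : Int) - 1, 0), (((r0 :: rest).length : Int) - 1, (r0.length : Int) - 1)] then 2
                     else 0)))).sum) 0 := by
            apply PySem.List.foldl_congr_mem'
            intro i _ acc
            rw [← PySem.List.foldl_add]
            apply PySem.List.foldl_congr_mem'
            intro j _ acc2
            simp only [mem_edge]
            generalize (PySem.List.pyGetD (PySem.List.pyGetD (r0 :: rest) i []) j (0, 0)) = cell
            obtain ⟨count, owner⟩ := cell
            by_cases h1 : owner = ai_player
            · simp only [pvSign, h1, BEq.rfl, if_true]
              split_ifs <;> ring
            · have h1' : (owner == ai_player) = false := by simp [h1]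
              by_cases h2 : owner = 0
              · subst h2
                simp [pvSign, h1']
              · have h2' : (owner != 0) = true := by simp [h2]
                have h3' : (owner != ai_player) = true := by simp [h1]
                simp only [pvSign, h1', h2', h3', Bool.false_eq_true, if_false, Bool.and_self, if_true]
                split_ifs <;> ring
        _ = _ := by rw [PySem.List.foldl_add, zero_add]
    have hR1 : (1 : Int) ≤ (((r0 :: rest).length : Nat) : Int) := by
      simp only [List.length_cons]; omega
    have hC1 : (1 : Int) ≤ ((r0.length : Nat) : Int) := by
      omega
    rw [hA]
    simp only [mul_add, PySem.List.sum_map_add_int]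
    -- base part
    have hbase : ((PySem.List.pyRange 0 (((r0 :: rest).length : Nat) : Int) 1).map (fun i =>
        ((PySem.List.pyRange 0 ((r0.length : Nat) : Int) 1).map (fun j =>
          pvSign ai_player (PySem.List.pyGetD (PySem.List.pyGetD (r0 :: rest) i []) j (0, 0)).2 *
            (PySem.List.pyGetD (PySem.List.pyGetD (r0 :: rest) i []) j (0, 0)).1)).sum)).sum
        = (((r0 :: rest).flatMap (fun row =>
            PySem.List.slice row none (some ((r0.length : Nat) : Int)))).map
              (fun c => pvSign ai_player c.2 * c.1)).sum := by
      rw [List.flatMap_def, List.map_flatten, List.sum_flatten, List.map_map, List.map_map]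
      rw [show ((((r0 :: rest).length : Nat)) : Int) = PySem.List.len (r0 :: rest) from
        (PySem.List.len_eq _).symm]
      rw [show (fun i => ((PySem.List.pyRange 0 ((r0.length : Nat) : Int) 1).map (fun j =>
            pvSign ai_player (PySem.List.pyGetD (PySem.List.pyGetD (r0 :: rest) i []) j (0, 0)).2 *
              (PySem.List.pyGetD (PySem.List.pyGetD (r0 :: rest) i []) j (0, 0)).1)).sum)
          = (fun row => ((PySem.List.pyRange 0 ((r0.length : Nat) : Int) 1).map (fun j =>
            pvSign ai_player (PySem.List.pyGetD row j (0, 0)).2 *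
              (PySem.List.pyGetD row j (0, 0)).1)).sum) ∘
            (fun i => PySem.List.pyGetD (r0 :: rest) i []) from rfl]
      rw [← List.map_map, PySem.List.map_pyGetD_pyRange_zero]
      apply congrArg List.sum
      apply List.map_congr_left
      intro row hrowmem
      simp only [Function.comp_apply]
      rw [show (fun j => pvSign ai_player (PySem.List.pyGetD row j ((0 : Int), (0 : Int))).2 *
            (PySem.List.pyGetD row j ((0 : Int), (0 : Int))).1)
          = (fun c => pvSign ai_player c.2 * c.1) ∘
            (fun j => PySem.List.pyGetD row j ((0 : Int), (0 : Int))) from rfl]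
      rw [← List.map_map, row_take row r0.length (hrow row hrowmem)]
      rw [PySem.List.slice_to row (by omega), Int.toNat_natCast]
    rw [hbase]
    -- bonus part
    have hbonus : ((PySem.List.pyRange 0 (((r0 :: rest).length : Nat) : Int) 1).map (fun i =>
        ((PySem.List.pyRange 0 ((r0.length : Nat) : Int) 1).map (fun j =>
          pvSign ai_player (PySem.List.pyGetD (PySem.List.pyGetD (r0 :: rest) i []) j (0, 0)).2 *
            (if (((i = 0 ∨ i = (((r0 :: rest).length : Nat) : Int) - 1) ∧ 1 ≤ j ∧ j < ((r0.length : Nat) : Int) - 1) ∨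
                  ((j = 0 ∨ j = ((r0.length : Nat) : Int) - 1) ∧ 1 ≤ i ∧ i < (((r0 :: rest).length : Nat) : Int) - 1)) then 1
             else if (i, j) ∈ [((0 : Int), (0 : Int)), (0, ((r0.length : Nat) : Int) - 1),
                  ((((r0 :: rest).length : Nat) : Int) - 1, 0), ((((r0 :: rest).length : Nat) : Int) - 1, ((r0.length : Nat) : Int) - 1)] then 2
             else 0))).sum)).sum
        = ((PySem.Set.union (PySem.Set.union (PySem.Set.union
            (PySem.Set.ofList ((PySem.List.pyRange 1 (((r0.length : Nat) : Int) - 1) 1).map (fun j => ((0 : Int), j))))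
            ((PySem.List.pyRange 1 (((r0.length : Nat) : Int) - 1) 1).map (fun j => ((((r0 :: rest).length : Nat) : Int) - 1, j))))
            ((PySem.List.pyRange 1 ((((r0 :: rest).length : Nat) : Int) - 1) 1).map (fun i => (i, (0 : Int)))))
            ((PySem.List.pyRange 1 ((((r0 :: rest).length : Nat) : Int) - 1) 1).map (fun i => (i, ((r0.length : Nat) : Int) - 1))) : List (Int × Int)).map
              (fun p => pvSign ai_player (PySem.List.pyGetD (PySem.List.pyGetD (r0 :: rest) p.1 []) p.2 (0, 0)).2)).sum
          + 2 * (((PySem.Set.ofList [((0 : Int), (0 : Int)), (0, ((r0.length : Nat) : Int) - 1),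
              ((((r0 :: rest).length : Nat) : Int) - 1, 0), ((((r0 :: rest).length : Nat) : Int) - 1, ((r0.length : Nat) : Int) - 1)] : List (Int × Int)).map
              (fun p => pvSign ai_player (PySem.List.pyGetD (PySem.List.pyGetD (r0 :: rest) p.1 []) p.2 (0, 0)).2)).sum) := by
      rw [sum_sum_eq_sum_pvGrid]
      have hEsub : ∀ p ∈ (PySem.Set.union (PySem.Set.union (PySem.Set.union
            (PySem.Set.ofList ((PySem.List.pyRange 1 (((r0.length : Nat) : Int) - 1) 1).map (fun j => ((0 : Int), j))))
            ((PySem.List.pyRange 1 (((r0.length : Nat) : Int) - 1) 1).map (fun j => ((((r0 :: rest).length : Nat) : Int) - 1, j))))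
            ((PySem.List.pyRange 1 ((((r0 :: rest).length : Nat) : Int) - 1) 1).map (fun i => (i, (0 : Int)))))
            ((PySem.List.pyRange 1 ((((r0 :: rest).length : Nat) : Int) - 1) 1).map (fun i => (i, ((r0.length : Nat) : Int) - 1))) : List (Int × Int)),
          p ∈ pvGrid (((r0 :: rest).length : Nat) : Int) ((r0.length : Nat) : Int) := by
        intro p hp
        rw [mem_edgeSet (rows := (((r0 :: rest).length : Nat) : Int)) (cols := ((r0.length : Nat) : Int)) p.1 p.2] at hp
        rw [mem_pvGrid]
        omega
      have hKsub : ∀ p ∈ (PySem.Set.ofList [((0 : Int), (0 : Int)), (0, ((r0.length : Nat) : Int) - 1),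
            ((((r0 :: rest).length : Nat) : Int) - 1, 0), ((((r0 :: rest).length : Nat) : Int) - 1, ((r0.length : Nat) : Int) - 1)] : List (Int × Int)),
          p ∈ pvGrid (((r0 :: rest).length : Nat) : Int) ((r0.length : Nat) : Int) := by
        intro p hp
        rw [PySem.Set.mem_ofList] at hp
        rw [mem_pvGrid]
        simp only [List.mem_cons, List.not_mem_nil, or_false] at hp
        rcases hp with rfl | rfl | rfl | rfl <;> simp <;> omega
      rw [← sum_map_ite_mem _ _ _ (nodup_pvGrid _ _) (nodup_edgeSet _ _) hEsub,
          ← sum_map_ite_mem _ _ _ (nodup_pvGrid _ _) (PySem.Set.nodup_ofList _) hKsub,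
          ← List.sum_map_mul_left, ← PySem.List.sum_map_add_int]
      apply congrArg List.sum
      apply List.map_congr_left
      intro p hp
      rw [mem_pvGrid] at hp
      obtain ⟨i, j⟩ := p
      simp only [mem_edgeSet, PySem.Set.mem_ofList, List.mem_cons, List.not_mem_nil, or_false,
        Prod.mk.injEq] at *
      split_ifs with he hk hk
      · exfalso; omega
      · ring
      · ring
      · ring
    rw [hbonus]
    -- assemble B
    unfold heuristic_8_alt
    dsimp only
    rw [hhead]
    have hne : (((r0.length : Nat) : Int) == 0) = false := by
      simp only [beq_eq_false_iff_ne, ne_eq]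
      omega
    simp only [hne, Bool.false_eq_true, if_false]

-- ===== VERDICT (by name: the statement is the Claim_ definition above) =====
theorem heuristic_8_spec : Claim_equal_heuristic_8 := by
  intro board ai_player _ hpre
  unfold Spec_heuristic_8
  exact heuristic_8_eq board ai_player hpre.1 hpre.2
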